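-- pv_equiv track=rewrite | github.com/MarianDubei/monolith-uprising-counter-bot | monolith_uprising_counter_bot.py | get_equipped_equipment
-- ===== SOURCE A (Python) =====
-- from typing import Optional, Dict, List, Iterable, Set, DefaultDict, Tuple, Union, Sequence
--
-- def get_equipped_equipment(
--     roles: Sequence[str],
--     factionEquipmentList: Set[str],
-- ) -> Set[str]:
--     """
--     From roles, return only those that are equipment roles present in factionEquipmentList.
--     """
--     equipped: Set[str] = set()
--     for r in roles:
--         for faction_eq in factionEquipmentList:
--             # such complication is required since the roles on the server have emoji before the actual name of the role
--             if r.strip().endswith(faction_eq):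
--                 equipped.add(faction_eq)
--     return equipped
-- ===== SOURCE B (Python) =====
-- def get_equipped_equipment(roles, factionEquipmentList):
--     equipment = set(factionEquipmentList)
--     equipped = set()
--     for r in roles:
--         s = r.strip()
--         suffixes = {s[j:] for j in range(len(s) + 1)}
--         equipped |= equipment & suffixes
--     return equipped
-- ===== Notes on version B (the rewrite author's own statement) =====
-- stated objective: faster
-- what changed: Instead of testing every role against every equipment string with endswith, B builds the suffix set of each stripped role once and intersects it with the equipment set, so the inner equipment scan with O(L) endswith disappears.
import Mathlib
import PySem

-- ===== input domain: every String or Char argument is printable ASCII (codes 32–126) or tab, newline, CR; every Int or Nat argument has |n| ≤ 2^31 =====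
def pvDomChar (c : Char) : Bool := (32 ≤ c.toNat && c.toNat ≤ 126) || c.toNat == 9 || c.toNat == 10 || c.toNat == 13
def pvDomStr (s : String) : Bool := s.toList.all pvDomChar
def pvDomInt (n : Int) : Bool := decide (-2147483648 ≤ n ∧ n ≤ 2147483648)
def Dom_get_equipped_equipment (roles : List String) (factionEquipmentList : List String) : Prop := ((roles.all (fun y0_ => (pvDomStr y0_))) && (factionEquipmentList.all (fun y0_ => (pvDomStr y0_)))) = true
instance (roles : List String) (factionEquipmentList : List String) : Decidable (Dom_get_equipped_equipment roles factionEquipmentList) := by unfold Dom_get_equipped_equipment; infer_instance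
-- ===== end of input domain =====

-- B replaces A's per-pair endswith test by intersecting the equipment set with the
-- suffix set of each stripped role, built once per role; objective: faster.

-- ===== PORT A =====
def get_equipped_equipment (roles : List String) (factionEquipmentList : List String) : List String :=
  roles.foldl
    (fun equipped r =>
      factionEquipmentList.foldl
        (fun equipped faction_eq =>
          if PySem.Str.endswith (PySem.Str.strip r) faction_eq then
            PySem.Set.add equipped faction_eq
          else
            equipped)
        equipped)
    PySem.Set.empty

-- ===== PORT B =====
-- equipment = set(factionEquipmentList); equipped = set()
-- for r in roles: s = r.strip(); suffixes = {s[j:] for j in range(len(s)+1)}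
--                 equipped |= equipment & suffixes
def get_equipped_equipment_alt (roles : List String) (factionEquipmentList : List String) : List String :=
  let equipment := PySem.Set.ofList factionEquipmentList
  roles.foldl
    (fun equipped r =>
      let s := PySem.Str.strip r
      let suffixes := PySem.Set.ofList
        ((PySem.List.pyRange 0 (PySem.Str.len s + 1)).map
          (fun j => PySem.Str.slice s (some j) none))
      PySem.Set.union equipped (PySem.Set.inter equipment suffixes))
    PySem.Set.empty

-- ===== PRECONDITION & SPEC =====
def Spec_get_equipped_equipment (roles : List String) (factionEquipmentList : List String) (out : List String) : Prop := out = get_equipped_equipment_alt roles factionEquipmentList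
instance (roles : List String) (factionEquipmentList : List String) (out : List String) : Decidable (Spec_get_equipped_equipment roles factionEquipmentList out) := by unfold Spec_get_equipped_equipment; infer_instance

-- ===== CLAIM (what is proved, stated in full; the proofs are below) =====
def Claim_equal_get_equipped_equipment : Prop := ∀ (roles : List String) (factionEquipmentList : List String), Dom_get_equipped_equipment roles factionEquipmentList → Spec_get_equipped_equipment roles factionEquipmentList (get_equipped_equipment roles factionEquipmentList)

-- ===== LEMMAS AND PROOFS =====

-- "equipment e matches role r": r.strip().endswith(e)
def pvPred (r e : String) : Bool := PySem.Str.endswith (PySem.Str.strip r) e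

-- A's inner loop over the equipment adds exactly the matching equipment, in order
theorem pvA_inner (r : String) (eqs : List String) (s : PySem.Set String) :
    eqs.foldl
      (fun equipped faction_eq =>
        if PySem.Str.endswith (PySem.Str.strip r) faction_eq then
          PySem.Set.add equipped faction_eq
        else equipped) s
      = PySem.Set.update s (eqs.filter (fun e => pvPred r e)) := by
  induction eqs generalizing s with
  | nil => rfl
  | cons e t ih =>
    rw [List.foldl_cons, List.filter_cons]
    cases h : pvPred r e with
    | true =>
      have h' := h; simp only [pvPred] at h'
      rw [if_pos h', if_pos rfl, PySem.Set.update_cons, ih]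
    | false =>
      have h' := h; simp only [pvPred] at h'
      rw [if_neg (by simp only [h']; exact Bool.false_ne_true),
          if_neg (fun hc => absurd hc Bool.false_ne_true), ih]

-- set(filter) = filter(set)
theorem pv_ofList_filter (p : String → Bool) (l : List String) :
    PySem.Set.ofList (l.filter p) = (PySem.Set.ofList l).filter p := by
  induction l using List.reverseRecOn with
  | nil => simp [PySem.Set.ofList]
  | append_singleton t x ih =>
    rw [List.filter_append]
    by_cases h : p x = true
    · simp [h, PySem.Set.ofList_append_singleton, ih]
      by_cases hx : x ∈ t
      · have hx' : x ∈ (PySem.Set.ofList t).filter p := by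
          simp [List.mem_filter, PySem.Set.mem_ofList, hx, h]
        have hx'' : x ∈ PySem.Set.ofList t := by simp [PySem.Set.mem_ofList, hx]
        rw [PySem.Set.add_of_mem hx', PySem.Set.add_of_mem hx'']
      · have hx' : x ∉ (PySem.Set.ofList t).filter p := by
          simp [List.mem_filter, PySem.Set.mem_ofList]; intro hc; exact absurd hc hx
        have hx'' : x ∉ PySem.Set.ofList t := by simp [PySem.Set.mem_ofList, hx]
        rw [PySem.Set.add_of_not_mem hx', PySem.Set.add_of_not_mem hx'', List.filter_append]
        simp [h]
    · simp [h, PySem.Set.ofList_append_singleton, ih]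
      by_cases hx : x ∈ PySem.Set.ofList t
      · rw [PySem.Set.add_of_mem hx]
      · rw [PySem.Set.add_of_not_mem hx, List.filter_append]
        simp [h]

-- updating with set(l) is updating with l
theorem pv_update_ofList (s : PySem.Set String) (l : List String) :
    PySem.Set.update s (PySem.Set.ofList l) = PySem.Set.update s l := by
  induction l using List.reverseRecOn with
  | nil => rfl
  | append_singleton t x ih =>
    rw [PySem.Set.ofList_append_singleton]
    by_cases hx : x ∈ t
    · have h1 : x ∈ PySem.Set.ofList t := (PySem.Set.mem_ofList _ _).mpr hx
      rw [PySem.Set.add_of_mem h1, ih, PySem.Set.update_append, PySem.Set.update_cons,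
          PySem.Set.update_nil]
      have h2 : x ∈ PySem.Set.update s t := (PySem.Set.mem_update _ _ _).mpr (Or.inr hx)
      rw [PySem.Set.add_of_mem h2]
    · have h1 : x ∉ PySem.Set.ofList t := fun hc => hx ((PySem.Set.mem_ofList _ _).mp hc)
      rw [PySem.Set.add_of_not_mem h1, PySem.Set.update_append, PySem.Set.update_append, ih]

-- the suffixes of s, as produced by B's comprehension, are exactly the strings s ends with
theorem pv_suffix_mem (s e : String) :
    (e ∈ (PySem.List.pyRange 0 (PySem.Str.len s + 1)).map
        (fun j => PySem.Str.slice s (some j) none))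
      ↔ PySem.Str.endswith s e = true := by
  have hn : PySem.Str.len s + 1 = ((s.toList.length + 1 : Nat) : Int) := by
    rw [PySem.Str.len_eq]; push_cast; ring
  rw [hn, PySem.List.pyRange_zero_natCast]
  rw [PySem.Str.endswith_eq, PySem.Chars.endswith_iff]
  constructor
  · rintro h
    rw [List.mem_map] at h
    obtain ⟨j, hj, hje⟩ := h
    rw [List.mem_map] at hj
    obtain ⟨k, hk, rfl⟩ := hj
    have : (PySem.Str.slice s (some (k : Int)) none).toList = s.toList.drop k := by
      rw [PySem.Str.toList_slice, PySem.Chars.slice_eq_listSlice, PySem.List.slice_from_natCast]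
    rw [← hje, this]
    exact List.drop_suffix k s.toList
  · intro h
    rw [List.suffix_iff_eq_drop] at h
    set k := s.toList.length - e.toList.length with hk
    have hkmem : k ∈ List.range (s.toList.length + 1) := by
      rw [List.mem_range]; omega
    rw [List.mem_map]
    refine ⟨(k : Int), ?_, ?_⟩
    · rw [List.mem_map]; exact ⟨k, hkmem, rfl⟩
    · apply String.ext
      rw [PySem.Str.toList_slice, PySem.Chars.slice_eq_listSlice, PySem.List.slice_from_natCast]
      exact h.symm

-- B's per-role step equals A's per-role step
theorem pv_step (eqs : List String) (r : String) (s : PySem.Set String) :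
    PySem.Set.union s
        (PySem.Set.inter (PySem.Set.ofList eqs)
          (PySem.Set.ofList
            ((PySem.List.pyRange 0 (PySem.Str.len (PySem.Str.strip r) + 1)).map
              (fun j => PySem.Str.slice (PySem.Str.strip r) (some j) none))))
      = PySem.Set.update s (eqs.filter (fun e => pvPred r e)) := by
  have hfc : (PySem.Set.ofList eqs).filter
      (fun x => PySem.Set.contains
        (PySem.Set.ofList
          ((PySem.List.pyRange 0 (PySem.Str.len (PySem.Str.strip r) + 1)).map
            (fun j => PySem.Str.slice (PySem.Str.strip r) (some j) none))) x)
      = (PySem.Set.ofList eqs).filter (fun e => pvPred r e) := by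
    apply List.filter_congr
    intro e _
    cases hp : pvPred r e with
    | true =>
      have h' := hp; simp only [pvPred] at h'
      exact (PySem.Set.contains_iff _ _).mpr ((PySem.Set.mem_ofList _ _).mpr ((pv_suffix_mem _ _).mpr h'))
    | false =>
      apply Bool.eq_false_iff.mpr
      intro hc
      have := (pv_suffix_mem _ _).mp ((PySem.Set.mem_ofList _ _).mp ((PySem.Set.contains_iff _ _).mp hc))
      simp only [pvPred] at hp
      rw [this] at hp; cases hp
  show PySem.Set.update s ((PySem.Set.ofList eqs).filter _) = _
  rw [hfc, ← pv_ofList_filter, pv_update_ofList]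

-- the two ports agree (role-by-role, from the right)
theorem pv_main (roles eqs : List String) :
    get_equipped_equipment roles eqs = get_equipped_equipment_alt roles eqs := by
  unfold get_equipped_equipment get_equipped_equipment_alt
  induction roles using List.reverseRecOn with
  | nil => rfl
  | append_singleton t r ih =>
    rw [List.foldl_append, List.foldl_append, ← ih, List.foldl_cons, List.foldl_nil,
        List.foldl_cons, List.foldl_nil, pvA_inner, pv_step]

-- ===== VERDICT (by name: the statement is the Claim_ definition above) =====
theorem get_equipped_equipment_spec : Claim_equal_get_equipped_equipment := by
  intro roles eqs _
  exact pv_main roles eqs
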